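-- pv_equiv track=rewrite | github.com/PawseySC/pawsey-uptake-project-quantum-umelb | workflows/multall-training/multall_flow.py | process_multall_output
-- ===== SOURCE A (Python) =====
-- from typing import List, Set, Callable, Tuple, Dict, Any
--
-- def process_multall_output(
--         input : str,
--         inletkeystrings : List[str] = [
--             "INLET AND EXIT STAGNATION PRESSURES",
--             "INLET AND EXIT STATIC PRESSURES",
--             "INLET AND EXIT STAGNATION TEMPERATURES",
--             "INLET AND OUTLET MASS FLOW RATES",
--         ],
--         efficiencykeystrings : List[str] = [
--             "TOTAL TO TOTAL ISENTROPIC EFFICIENCY",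
--             "TOTAL TO STATIC ISENTROPIC EFFICIENCY",
--             "TOTAL TO TOTAL POLYTROPIC EFFICIENCY",
--         ],
--         tempkeystring: List[str]= [
--             "INLET, MID and EXIT STATIC TEMPERATURES",
--         ]
-- ) -> Dict:
--     # convert the string to a list find last instance of relevant strings
--     input = input.strip().split('\n')
--     input.reverse()
--     data = {}
--     for key in inletkeystrings:
--         for i in input:
--             if key in i:
--                 data[key] = str(i.split("=")[-1]).split()
--                 break
--
--     for key in efficiencykeystrings:
--         for i in input:
--             if key in i:
--                 data[key] = (i.split("=")[-1]).split()
--                 break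
--
--     for key in tempkeystring:
--         for i in input:
--             if key in i:
--                 data[key] = str(i.split("=")[-1]).split()
--                 break
--     return data
-- ===== SOURCE B (Python) =====
-- def process_multall_output(
--         input,
--         inletkeystrings=[
--             "INLET AND EXIT STAGNATION PRESSURES",
--             "INLET AND EXIT STATIC PRESSURES",
--             "INLET AND EXIT STAGNATION TEMPERATURES",
--             "INLET AND OUTLET MASS FLOW RATES",
--         ],
--         efficiencykeystrings=[
--             "TOTAL TO TOTAL ISENTROPIC EFFICIENCY",
--             "TOTAL TO STATIC ISENTROPIC EFFICIENCY",
--             "TOTAL TO TOTAL POLYTROPIC EFFICIENCY",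
--         ],
--         tempkeystring=[
--             "INLET, MID and EXIT STATIC TEMPERATURES",
--         ]):
--     # single forward pass over the lines; later matches overwrite, so the
--     # last occurrence of each key wins; output in key order as A does.
--     allkeys = inletkeystrings + efficiencykeystrings + tempkeystring
--     found = {}
--     for line in input.strip().split('\n'):
--         for key in allkeys:
--             if key in line:
--                 found[key] = line.split('=')[-1].split()
--     return {key: found[key] for key in allkeys if key in found}
-- ===== Notes on version B (the rewrite author's own statement) =====
-- stated objective: alternative
-- what changed: B replaces A's per-key scans over the reversed line list (break on first match) with one forward pass over the lines that records the last match per key in a dict, then emits the keys in A's key order.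
import Mathlib
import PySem

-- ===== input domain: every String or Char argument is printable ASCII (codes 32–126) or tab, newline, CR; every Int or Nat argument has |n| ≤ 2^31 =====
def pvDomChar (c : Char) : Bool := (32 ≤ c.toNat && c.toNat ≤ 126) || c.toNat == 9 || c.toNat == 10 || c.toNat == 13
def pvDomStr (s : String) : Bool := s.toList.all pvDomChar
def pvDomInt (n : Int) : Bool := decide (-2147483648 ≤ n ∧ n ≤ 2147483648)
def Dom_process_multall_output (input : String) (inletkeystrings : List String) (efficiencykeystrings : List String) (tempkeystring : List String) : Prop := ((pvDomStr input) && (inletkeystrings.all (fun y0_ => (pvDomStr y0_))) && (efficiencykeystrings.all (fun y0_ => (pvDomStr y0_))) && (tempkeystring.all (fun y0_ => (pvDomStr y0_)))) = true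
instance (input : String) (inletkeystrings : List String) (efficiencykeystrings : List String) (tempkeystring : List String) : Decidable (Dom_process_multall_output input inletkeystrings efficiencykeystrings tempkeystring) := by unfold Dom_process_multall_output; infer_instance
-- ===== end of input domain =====

-- B does one forward pass over the lines (last match per key wins) instead of A's
-- per-key scans over the reversed line list; same return value, proved equal.

-- ===== PORT A =====

-- i.split("=")[-1].split()  (split("=") is never empty, so [-1] is its last element)
def pvLineVal (l : String) : List String :=
  PySem.Str.split₀ (((PySem.Str.split? l "=").getD []).getLastD "")  -- split? is some: sep "=" ≠ ""

-- the inner 'for i in input: if key in i: … break' loop of A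
def pvFindVal (key : String) : List String → Option (List String)
  | [] => none
  | l :: ls => if PySem.Str.isIn key l then some (pvLineVal l) else pvFindVal key ls

-- one of A's 'for key in …' loops over a key list (data is the dict accumulator)
def pvKeyLoop (revLines : List String) (keys : List String)
    (data : PySem.Dict String (List String)) : PySem.Dict String (List String) :=
  keys.foldl (fun d key =>
    match pvFindVal key revLines with
    | some v => d.insert key v
    | none => d) data

def process_multall_output (input : String) (inletkeystrings : List String) (efficiencykeystrings : List String) (tempkeystring : List String) : List (String × List String) :=
  let lines := ((PySem.Str.split? (PySem.Str.strip input) "\n").getD []).reverse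
  let data : PySem.Dict String (List String) := PySem.Dict.empty
  let data := pvKeyLoop lines inletkeystrings data
  let data := pvKeyLoop lines efficiencykeystrings data
  let data := pvKeyLoop lines tempkeystring data
  data.items

-- ===== PORT B =====

def process_multall_output_alt (input : String) (inletkeystrings : List String) (efficiencykeystrings : List String) (tempkeystring : List String) : List (String × List String) :=
  let allkeys := inletkeystrings ++ efficiencykeystrings ++ tempkeystring
  let found : PySem.Dict String (List String) :=
    (((PySem.Str.split? (PySem.Str.strip input) "\n").getD []).foldl (fun f line =>
      allkeys.foldl (fun f key =>
        if PySem.Str.isIn key line then f.insert key (pvLineVal line) else f) f)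
      PySem.Dict.empty)
  (allkeys.foldl (fun d key =>
    match found.get? key with
    | some v => d.insert key v
    | none => d) PySem.Dict.empty).items

-- ===== PRECONDITION & SPEC =====
def Spec_process_multall_output (input : String) (inletkeystrings : List String) (efficiencykeystrings : List String) (tempkeystring : List String) (out : List (String × List String)) : Prop := out = process_multall_output_alt input inletkeystrings efficiencykeystrings tempkeystring
instance (input : String) (inletkeystrings : List String) (efficiencykeystrings : List String) (tempkeystring : List String) (out : List (String × List String)) : Decidable (Spec_process_multall_output input inletkeystrings efficiencykeystrings tempkeystring out) := by unfold Spec_process_multall_output; infer_instance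

-- ===== CLAIM (what is proved, stated in full; the proofs are below) =====
def Claim_equal_process_multall_output : Prop := ∀ (input : String) (inletkeystrings : List String) (efficiencykeystrings : List String) (tempkeystring : List String), Dom_process_multall_output input inletkeystrings efficiencykeystrings tempkeystring → Spec_process_multall_output input inletkeystrings efficiencykeystrings tempkeystring (process_multall_output input inletkeystrings efficiencykeystrings tempkeystring)

-- ===== LEMMAS AND PROOFS =====

-- B's inner per-line loop: the key k ends up mapped to this line's value iff k is a
-- matching key of the list; other keys keep their old binding.
lemma pv_inner_get? (l : String) (ks : List String) (f : PySem.Dict String (List String))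
    (k : String) :
    (ks.foldl (fun f key =>
        if PySem.Str.isIn key l then f.insert key (pvLineVal l) else f) f).get? k
      = if k ∈ ks ∧ PySem.Str.isIn k l then some (pvLineVal l) else f.get? k := by
  induction ks generalizing f with
  | nil => simp
  | cons k' ks ih =>
    simp only [List.foldl_cons, ih]
    by_cases hk : k' = k
    · subst hk
      by_cases hin : PySem.Chars.isIn k'.toList l.toList = true
      · simp [hin, PySem.Dict.get?_insert_self]
      · simp [hin]
    · by_cases hin : PySem.Chars.isIn k'.toList l.toList = true
      · simp only [PySem.Str.isIn_eq, if_pos hin,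
          PySem.Dict.get?_insert_of_ne _ _ (fun h => hk h.symm)]
        simp [Ne.symm hk]
      · simp only [PySem.Str.isIn_eq, if_neg hin]
        simp [Ne.symm hk]

-- pvFindVal distributes over ++ (first match wins)
lemma pv_findVal_append (k : String) (xs ys : List String) :
    pvFindVal k (xs ++ ys)
      = match pvFindVal k xs with
        | some v => some v
        | none => pvFindVal k ys := by
  induction xs with
  | nil => simp [pvFindVal]
  | cons x xs ih =>
    simp only [List.cons_append, pvFindVal]
    by_cases h : PySem.Chars.isIn k.toList x.toList = true
    · simp [h]
    · simp [h, ih]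

-- the core invariant: B's forward fold records, for every key of allkeys, exactly
-- the value A finds by scanning the reversed line list
lemma pv_found_get? (allkeys : List String) (lines : List String)
    (f : PySem.Dict String (List String)) (k : String) (hk : k ∈ allkeys) :
    ((lines.foldl (fun f line =>
        allkeys.foldl (fun f key =>
          if PySem.Str.isIn key line then f.insert key (pvLineVal line) else f) f) f)).get? k
      = match pvFindVal k lines.reverse with
        | some v => some v
        | none => f.get? k := by
  induction lines generalizing f with
  | nil => simp [pvFindVal]
  | cons l ls ih =>
    simp only [List.foldl_cons, ih, List.reverse_cons, pv_findVal_append]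
    cases h : pvFindVal k ls.reverse with
    | some v => rfl
    | none =>
      simp only [pvFindVal, pv_inner_get? l allkeys f k]
      by_cases hin : PySem.Chars.isIn k.toList l.toList = true
      · simp [hin, hk]
      · simp [hin]

-- A's three key loops are one fold over the concatenated key list
lemma pv_keyLoop_append (revLines : List String) (ks₁ ks₂ : List String)
    (d : PySem.Dict String (List String)) :
    pvKeyLoop revLines ks₂ (pvKeyLoop revLines ks₁ d)
      = pvKeyLoop revLines (ks₁ ++ ks₂) d := by
  simp [pvKeyLoop, List.foldl_append]

-- ===== VERDICT (by name: the statement is the Claim_ definition above) =====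
theorem process_multall_output_spec : Claim_equal_process_multall_output := by
  intro input inlet eff temp _hDom
  unfold Spec_process_multall_output
  dsimp only [process_multall_output, process_multall_output_alt]
  simp only [pv_keyLoop_append]
  apply congrArg PySem.Dict.items
  unfold pvKeyLoop
  apply PySem.List.foldl_congr_mem
  intro acc k hk
  rw [pv_found_get? (inlet ++ eff ++ temp) _ PySem.Dict.empty k hk]
  cases pvFindVal k ((PySem.Str.split? (PySem.Str.strip input) "\n").getD []).reverse <;> rfl
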